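-- pv_equiv track=rewrite | github.com/lucabrasi83/anutacpedeployment | lib/servicemodel-6.0.0.0/scripts/abstract_dev_mgr.py | get_list_relative_distance
-- ===== SOURCE A (Python) =====
-- def get_list_relative_distance(rcpath):
--   rcpath_split = rcpath.split('=')
--   if len(rcpath_split) == 1:
--     return 0
--
--   loc = 0
--   rcpath_split = rcpath.split('/')
--   for i, path in enumerate(rcpath_split):
--     if len(path.split('=')) > 1:
--       loc = i+1
--
--   if loc == i+1:
--     return -1
--
--   return loc
-- ===== SOURCE B (Python) =====
-- def get_list_relative_distance(rcpath):
--   seg = 0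
--   last = None
--   for ch in rcpath:
--     if ch == '/':
--       seg += 1
--     elif ch == '=':
--       last = seg
--   if last is None:
--     return 0
--   if last == seg:
--     return -1
--   return last + 1
-- ===== Notes on version B (the rewrite author's own statement) =====
-- stated objective: alternative
-- what changed: B replaces A's two string splits and the enumerate loop over the segment list by a single character scan that tracks the current segment index (slashes seen so far) and the segment index of the most recent equals sign, so no segment lists are ever built.
import Mathlib
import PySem

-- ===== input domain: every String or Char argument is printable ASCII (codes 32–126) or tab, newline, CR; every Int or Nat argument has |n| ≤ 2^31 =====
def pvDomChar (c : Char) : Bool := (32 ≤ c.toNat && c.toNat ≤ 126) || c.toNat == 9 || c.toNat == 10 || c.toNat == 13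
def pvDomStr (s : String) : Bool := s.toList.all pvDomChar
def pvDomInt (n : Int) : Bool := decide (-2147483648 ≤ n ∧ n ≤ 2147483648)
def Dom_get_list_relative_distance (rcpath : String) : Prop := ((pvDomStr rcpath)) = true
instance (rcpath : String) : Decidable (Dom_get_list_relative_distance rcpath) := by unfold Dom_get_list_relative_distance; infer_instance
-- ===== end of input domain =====

-- B replaces A's two string splits and the loop over the segment list by a single
-- character scan tracking the current segment index and the segment index of the most
-- recent equals sign (objective: alternative).

-- ===== PORT A =====
def get_list_relative_distance (rcpath : String) : Int :=
  let rcpath_split := PySem.Chars.splitOn rcpath.toList "=".toList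
  if rcpath_split.length = 1 then 0
  else
    let segs := PySem.Chars.splitOn rcpath.toList "/".toList
    let r := (PySem.List.enumerate segs 0).foldl
      (fun (st : Int × Int) p =>
        if 1 < (PySem.Chars.splitOn p.2 "=".toList).length then (p.1 + 1, p.1) else (st.1, p.1))
      (0, 0)
    if r.1 = r.2 + 1 then -1 else r.1

-- ===== PORT B =====
def get_list_relative_distance_alt (rcpath : String) : Int :=
  let r := rcpath.toList.foldl
    (fun (st : Int × Option Int) ch =>
      if ch = '/' then (st.1 + 1, st.2)
      else if ch = '=' then (st.1, some st.1)
      else st)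
    (0, none)
  match r.2 with
  | none => 0
  | some last => if last = r.1 then -1 else last + 1

-- ===== PRECONDITION & SPEC =====
def Spec_get_list_relative_distance (rcpath : String) (out : Int) : Prop := out = get_list_relative_distance_alt rcpath
instance (rcpath : String) (out : Int) : Decidable (Spec_get_list_relative_distance rcpath out) := by unfold Spec_get_list_relative_distance; infer_instance

-- ===== CLAIM (what is proved, stated in full; the proofs are below) =====
def Claim_equal_get_list_relative_distance : Prop := ∀ (rcpath : String), Dom_get_list_relative_distance rcpath → Spec_get_list_relative_distance rcpath (get_list_relative_distance rcpath)

-- ===== LEMMAS AND PROOFS =====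
def splitOn1 (h : Char) : List Char → List (List Char)
  | [] => [[]]
  | c :: rest => if c = h then [] :: splitOn1 h rest else (splitOn1 h rest).modifyHead (c :: ·)

lemma splitOn1_ne_nil (h : Char) (l : List Char) : splitOn1 h l ≠ [] := by
  cases l with
  | nil => simp [splitOn1]
  | cons c rest => simp only [splitOn1]; split <;> simp [List.modifyHead_eq_nil_iff, splitOn1_ne_nil h rest]

lemma go_inv (h : Char) : ∀ (l : List Char) (fuel : Nat), l.length ≤ fuel →
    ∀ (cur : List Char) (acc : List (List Char)),
    PySem.Chars.splitOn.go [h] fuel l cur acc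
      = acc.reverse ++ (splitOn1 h l).modifyHead (cur.reverse ++ ·) := by
  intro l
  induction l with
  | nil => intro fuel hf cur acc
           cases fuel with
           | zero => simp [PySem.Chars.splitOn.go, splitOn1]
           | succ n => simp [PySem.Chars.splitOn.go, splitOn1]
  | cons c rest ih =>
    intro fuel hf cur acc
    simp only [List.length_cons] at hf
    obtain ⟨s0, r0, hs⟩ := List.exists_cons_of_ne_nil (splitOn1_ne_nil h rest)
    cases fuel with
    | zero => omega
    | succ n =>
      rw [PySem.Chars.splitOn.go]
      simp only [List.isPrefixOf, Bool.and_true, splitOn1]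
      by_cases hch : h = c
      · subst hch
        simp only [beq_self_eq_true, if_pos, List.length_cons, List.length_nil,
          List.drop_succ_cons, List.drop_zero]
        rw [ih n (by omega) [] (cur.reverse :: acc)]
        simp [hs]
      · have : (h == c) = false := by simp [hch]
        simp only [this, Bool.false_eq_true, if_false]
        rw [ih n (by omega) (c :: cur) acc]
        have hch' : ¬ c = h := fun hx => hch hx.symm
        simp [hch', hs]

lemma splitOn_eq_splitOn1 (h : Char) (l : List Char) :
    PySem.Chars.splitOn l [h] = splitOn1 h l := by
  unfold PySem.Chars.splitOn
  rw [go_inv h l (l.length + 1) (by omega) [] []]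
  obtain ⟨s0, r0, hs⟩ := List.exists_cons_of_ne_nil (splitOn1_ne_nil h l)
  simp [hs]

lemma length_splitOn1 (h : Char) (l : List Char) :
    (splitOn1 h l).length = l.count h + 1 := by
  induction l with
  | nil => simp [splitOn1]
  | cons c rest ih =>
    simp only [splitOn1]
    by_cases hc : c = h
    · simp [hc, ih]
    · simp [hc, ih]

-- A-side abstract fold over segments
def foldAux : List (List Char) → Int → Int × Int → Int × Int
  | [], _, st => st
  | seg :: rest, k, st =>
    foldAux rest (k + 1) (if '=' ∈ seg then (k + 1, k) else (st.1, k))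

lemma enumerate_foldl_eq_foldAux (segs : List (List Char)) : ∀ (k : Int) (st : Int × Int),
    (PySem.List.enumerate segs k).foldl
      (fun (st : Int × Int) p =>
        if 1 < (PySem.Chars.splitOn p.2 ['=']).length then (p.1 + 1, p.1) else (st.1, p.1)) st
    = foldAux segs k st := by
  induction segs with
  | nil => intro k st; simp [PySem.List.enumerate_nil, foldAux]
  | cons seg rest ih =>
    intro k st
    rw [PySem.List.enumerate_cons, List.foldl_cons, ih, foldAux]
    have : (1 < (PySem.Chars.splitOn seg ['=']).length) ↔ '=' ∈ seg := by
      rw [splitOn_eq_splitOn1, length_splitOn1]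
      simp [List.count_pos_iff]
    simp only [this]

-- B-side step
def stepB (st : Int × Option Int) (ch : Char) : Int × Option Int :=
  if ch = '/' then (st.1 + 1, st.2)
  else if ch = '=' then (st.1, some st.1)
  else st

def mOpt : Option Int → Int
  | none => 0
  | some j => j + 1

lemma foldB_none (l : List Char) : ∀ (k : Int) (o : Option Int),
    (l.foldl stepB (k, o)).2 = none ↔ o = none ∧ '=' ∉ l := by
  induction l with
  | nil => intro k o; simp
  | cons c rest ih =>
    intro k o
    rw [List.foldl_cons]
    by_cases hc : c = '/'
    · simp [stepB, hc, ih]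
    · by_cases he : c = '='
      · simp [stepB, he, ih]
      · simp [stepB, hc, he, ih, Ne.symm he]

lemma main_inv (cs : List Char) : ∀ (p : List Char) (k : Int) (o : Option Int) (i0 : Int),
    foldAux ((splitOn1 '/' cs).modifyHead (p ++ ·)) k (mOpt o, i0)
      = (mOpt (cs.foldl stepB (k, if '=' ∈ p then some k else o)).2,
         (cs.foldl stepB (k, if '=' ∈ p then some k else o)).1) := by
  induction cs with
  | nil =>
    intro p k o i0
    simp only [splitOn1, List.modifyHead_cons, List.append_nil, List.foldl_nil, foldAux]
    by_cases hp : '=' ∈ p <;> simp [hp, mOpt]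
  | cons c rest ih =>
    intro p k o i0
    by_cases hc : c = '/'
    · subst hc
      simp only [splitOn1, if_pos, List.modifyHead_cons, List.append_nil, foldAux]
      have h2 := ih [] (k + 1) (if '=' ∈ p then some k else o) k
      simp only [List.nil_append] at h2
      rw [show ((splitOn1 '/' rest).modifyHead (fun x => x)) = splitOn1 '/' rest by
            cases splitOn1 '/' rest <;> simp] at h2
      by_cases hp : '=' ∈ p
      · simpa [hp, mOpt, List.foldl_cons, stepB] using h2
      · simpa [hp, mOpt, List.foldl_cons, stepB] using h2
    · obtain ⟨s0, r0, hs⟩ := List.exists_cons_of_ne_nil (splitOn1_ne_nil '/' rest)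
      have hsp : splitOn1 '/' (c :: rest) = (c :: s0) :: r0 := by
        simp [splitOn1, hc, hs]
      rw [hsp]
      have h2 := ih (p ++ [c]) k o i0
      rw [hs] at h2
      simp only [List.modifyHead_cons, List.append_assoc, List.singleton_append] at h2 ⊢
      rw [List.foldl_cons]
      by_cases he : c = '='
      · subst he
        have : '=' ∈ p ++ ['='] := by simp
        rw [if_pos this] at h2
        simpa [stepB, hc] using h2
      · have : ('=' ∈ p ++ [c]) ↔ '=' ∈ p := by simp [Ne.symm he]
        rw [if_congr this rfl rfl] at h2
        simpa [stepB, hc, he] using h2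

lemma get_list_A_eq_B : ∀ (rcpath : String),
    get_list_relative_distance rcpath = get_list_relative_distance_alt rcpath := by
  intro s
  simp only [get_list_relative_distance, get_list_relative_distance_alt,
    show "=".toList = ['='] from rfl, show "/".toList = ['/'] from rfl]
  have hB : s.toList.foldl
      (fun (st : Int × Option Int) ch =>
        if ch = '/' then (st.1 + 1, st.2)
        else if ch = '=' then (st.1, some st.1)
        else st) (0, none) = s.toList.foldl stepB (0, none) := rfl
  rw [hB]
  have hguard : (PySem.Chars.splitOn s.toList ['=']).length = 1 ↔ '=' ∉ s.toList := by
    rw [splitOn_eq_splitOn1, length_splitOn1]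
    simp [List.count_eq_zero]
  by_cases he : '=' ∈ s.toList
  · rw [if_neg (by simp [hguard, he])]
    rw [enumerate_foldl_eq_foldAux]
    have hm := main_inv s.toList [] 0 none 0
    rw [splitOn_eq_splitOn1]
    rw [show (splitOn1 '/' s.toList) = (splitOn1 '/' s.toList).modifyHead (([] : List Char) ++ ·) by
          cases splitOn1 '/' s.toList <;> simp]
    simp only [List.not_mem_nil, if_false, mOpt] at hm
    rw [hm]
    obtain ⟨j, hj⟩ : ∃ j, (s.toList.foldl stepB (0, none)).2 = some j := by
      cases h2 : (s.toList.foldl stepB (0, none)).2 with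
      | none => rw [foldB_none] at h2; exact absurd h2.2 (by simp [he])
      | some j => exact ⟨j, rfl⟩
    rw [hj]
    by_cases hq : j = (s.toList.foldl stepB (0, none)).1
    · simp only [hq]
    · simp only [if_neg hq, if_neg (show ¬ (j + 1 = (s.toList.foldl stepB (0, none)).1 + 1) by omega)]
  · rw [if_pos (hguard.mpr he)]
    have : (s.toList.foldl stepB (0, none)).2 = none := by
      rw [foldB_none]; exact ⟨rfl, he⟩
    rw [this]

-- ===== VERDICT (by name: the statement is the Claim_ definition above) =====
theorem get_list_relative_distance_spec : Claim_equal_get_list_relative_distance := by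
  intro rcpath _
  exact get_list_A_eq_B rcpath
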